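-- pv_equiv track=rewrite | github.com/victoryabhi/CSA0604 | 26,py.py | generate_subsets_with_element
-- ===== SOURCE A (Python) =====
-- def generate_subsets_with_element(E, x):
--     def backtrack(start, path):
--         if x in path:
--             result.append(path)
--         for i in range(start, len(E)):
--             backtrack(i + 1, path + [E[i]])
--
--     result = []
--     backtrack(0, [])
--     return result
-- ===== SOURCE B (Python) =====
-- def generate_subsets_with_element(E, x):
--     result = []
--     stack = [(0, [])]
--     while stack:
--         start, path = stack.pop()
--         if x in path:
--             result.append(path)
--         # push children in reverse (largest i first) so the lowest index is expanded next,
--         # reproducing the recursive DFS preorder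
--         for i in range(len(E) - 1, start - 1, -1):
--             stack.append((i + 1, path + [E[i]]))
--     return result
-- ===== Notes on version B (the rewrite author's own statement) =====
-- stated objective: alternative
-- what changed: Replaces the nested recursive backtracking with an iterative DFS using an explicit LIFO stack of (start, path) frames, pushing children in reverse so the preorder and append timing are identical.
import Mathlib
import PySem

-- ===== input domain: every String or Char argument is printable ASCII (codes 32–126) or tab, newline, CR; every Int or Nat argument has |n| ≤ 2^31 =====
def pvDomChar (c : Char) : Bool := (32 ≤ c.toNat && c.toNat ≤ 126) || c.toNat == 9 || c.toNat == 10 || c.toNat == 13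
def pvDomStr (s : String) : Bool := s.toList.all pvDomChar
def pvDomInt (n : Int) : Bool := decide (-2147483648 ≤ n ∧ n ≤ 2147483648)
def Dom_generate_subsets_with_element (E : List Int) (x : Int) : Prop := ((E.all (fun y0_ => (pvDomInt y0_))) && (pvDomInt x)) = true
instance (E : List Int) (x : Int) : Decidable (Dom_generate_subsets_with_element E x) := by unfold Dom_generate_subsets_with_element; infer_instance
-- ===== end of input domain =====

-- ===== PORT A =====
-- B replaces the nested recursive backtracking with an explicit-stack iterative DFS; same output.

-- literal port of A's nested `backtrack`: the result list is returned in preorder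
-- (node appended before its children), exactly as A's global `result` receives it.
mutual
  def pvBtA (E : List Int) (x : Int) (start : Nat) (path : List Int) : List (List Int) :=
    (if x ∈ path then [path] else []) ++ pvChA E x start path
  termination_by (E.length - start, 1)
  -- the `for i in range(start, len(E))` loop of `backtrack`
  def pvChA (E : List Int) (x : Int) (i : Nat) (path : List Int) : List (List Int) :=
    if i < E.length then
      pvBtA E x (i + 1) (path ++ [E.getD i 0]) ++ pvChA E x (i + 1) path
    else []
  termination_by (E.length - i, 0)
end

def generate_subsets_with_element (E : List Int) (x : Int) : List (List Int) :=
  pvBtA E x 0 []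

-- ===== PORT B =====
-- measure used only for termination of the stack loop
def pvStackMeasure (n : Nat) (stack : List (Nat × List Int)) : Nat :=
  (stack.map (fun e => 2 ^ (n - e.1))).sum

theorem pvChildSum (k : Nat) : ∀ n s : Nat, n - s = k →
    ((List.range' s (n - s)).map (fun i => 2 ^ (n - (i + 1)))).sum < 2 ^ k := by
  induction k with
  | zero => intro n s h; simp [h]
  | succ k ih =>
    intro n s h
    have h2 : n - (s + 1) = k := by omega
    have hih := ih n (s + 1) h2
    rw [h2] at hih
    rw [h, List.range'_succ, List.map_cons, List.sum_cons, h2]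
    have hp : (2 : Nat) ^ (k + 1) = 2 ^ k + 2 ^ k := by ring
    omega

theorem pvMeasure_lt (E : List Int) (start : Nat) (path : List Int)
    (rest : List (Nat × List Int)) :
    pvStackMeasure E.length
      (((List.range' start (E.length - start)).map
          (fun i => (i + 1, path ++ [E.getD i 0]))) ++ rest)
      < pvStackMeasure E.length ((start, path) :: rest) := by
  simp only [pvStackMeasure, List.map_append, List.sum_append, List.map_cons, List.sum_cons,
    List.map_map, Function.comp_def]
  have h := pvChildSum (E.length - start) E.length start rfl
  omega

-- literal port of B: pop the top frame, record it if x ∈ path, then push the children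
-- largest-index-first (modelled here as prepending them in increasing-index order).
def pvLoopB (E : List Int) (x : Int) (stack : List (Nat × List Int))
    (result : List (List Int)) : List (List Int) :=
  match stack with
  | [] => result
  | (start, path) :: rest =>
    let result := if x ∈ path then result ++ [path] else result
    pvLoopB E x
      (((List.range' start (E.length - start)).map
          (fun i => (i + 1, path ++ [E.getD i 0]))) ++ rest)
      result
termination_by pvStackMeasure E.length stack
decreasing_by exact pvMeasure_lt E start path rest

def generate_subsets_with_element_alt (E : List Int) (x : Int) : List (List Int) :=
  pvLoopB E x [(0, [])] []

-- ===== PRECONDITION & SPEC =====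
def Spec_generate_subsets_with_element (E : List Int) (x : Int) (out : List (List Int)) : Prop := out = generate_subsets_with_element_alt E x
instance (E : List Int) (x : Int) (out : List (List Int)) : Decidable (Spec_generate_subsets_with_element E x out) := by unfold Spec_generate_subsets_with_element; infer_instance

-- ===== CLAIM (what is proved, stated in full; the proofs are below) =====
def Claim_equal_generate_subsets_with_element : Prop := ∀ (E : List Int) (x : Int), Dom_generate_subsets_with_element E x → Spec_generate_subsets_with_element E x (generate_subsets_with_element E x)

-- ===== LEMMAS AND PROOFS =====

-- folding a frame's children through pvBtA yields exactly pvChA for that frame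
theorem pvFoldChildren (E : List Int) (x : Int) (k : Nat) : ∀ s path r, E.length - s = k →
    List.foldl (fun (r : List (List Int)) (e : Nat × List Int) => r ++ pvBtA E x e.1 e.2) r
      ((List.range' s (E.length - s)).map (fun i => (i + 1, path ++ [E.getD i 0])))
      = r ++ pvChA E x s path := by
  induction k with
  | zero =>
    intro s path r h
    rw [h]
    have hns : ¬ s < E.length := by omega
    simp [pvChA, hns]
  | succ k ih =>
    intro s path r h
    have hs : s < E.length := by omega
    have h2 : E.length - (s + 1) = k := by omega
    have hih := ih (s + 1) path (r ++ pvBtA E x (s + 1) (path ++ [E.getD s 0])) h2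
    rw [h2] at hih
    rw [h, List.range'_succ, List.map_cons, List.foldl_cons]
    rw [pvChA, if_pos hs, ← List.append_assoc]
    exact hih

-- the stack loop computes the left fold of pvBtA over the stack frames
theorem pvLoopB_eq_aux (E : List Int) (x : Int) : ∀ (m : Nat) (stack : List (Nat × List Int))
    (result : List (List Int)), pvStackMeasure E.length stack < m →
    pvLoopB E x stack result =
      List.foldl (fun (r : List (List Int)) (e : Nat × List Int) => r ++ pvBtA E x e.1 e.2)
        result stack := by
  intro m
  induction m with
  | zero => intro stack result h; exact absurd h (Nat.not_lt_zero _)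
  | succ m ih =>
    intro stack result h
    match stack with
    | [] => rw [pvLoopB]; simp
    | (start, path) :: rest =>
      rw [pvLoopB]
      have hlt := pvMeasure_lt E start path rest
      rw [ih _ _ (by omega)]
      rw [List.foldl_append, List.foldl_cons,
        pvFoldChildren E x (E.length - start) start path _ rfl, pvBtA]
      by_cases hx : x ∈ path <;> simp [hx, List.append_assoc]

-- ===== VERDICT (by name: the statement is the Claim_ definition above) =====
theorem generate_subsets_with_element_spec : Claim_equal_generate_subsets_with_element := by
  intro E x _
  unfold Spec_generate_subsets_with_element generate_subsets_with_element generate_subsets_with_element_alt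
  rw [pvLoopB_eq_aux E x (pvStackMeasure E.length [(0, [])] + 1) _ _ (by omega)]
  simp
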